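-- pv_equiv track=rewrite | github.com/table7982/Nonogram | input_nice.py | pruning_function
-- ===== SOURCE A (Python) =====
-- import itertools
--
-- def near_list(a_list):
--     result = []
--     i = 0
--     while i < len(a_list):
--         if a_list[i] == 1:
--             count = 1  # 计数当前的1
--             # 计算右边连续的1
--             j = i + 1
--             while j < len(a_list) and a_list[j] == 1:
--                 count += 1
--                 j += 1
--             result.append(count)
--             i = j  # 跳过已经计数的1
--         else:
--             i += 1
--     return result
--
-- def if_match(a_list, match_list):
--     if near_list(a_list) == match_list:
--         ret = True
--     else:
--         ret = False
--     return ret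
--
-- def get_combinations(list_len, num):
--     # 初始化列表
--     result = []
--     # 生成所有可能的m个位置放1的组合
--     for positions in itertools.combinations(range(list_len), num):
--         # 创建一个长度为n的列表，初始化为0
--         combination = [0] * list_len
--         # 在指定的位置放1
--         for pos in positions:
--             combination[pos] = 1
--         # 将该组合加入结果列表
--         result.append(combination)
--     return result
--
-- def transpose(matrix):
--     return [[row[i] for row in matrix] for i in range(len(matrix[0]))]
--
-- def pruning_function(partial_solution, depth, lie_2list):
--     rest_num = len(lie_2list) - depth - 1
--     transposed_partial_solution = transpose(partial_solution)
--     for transposed_partial_solution_lie_index, transposed_partial_solution_lie in enumerate(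
--             transposed_partial_solution):
--         rest_fill_num = sum(lie_2list[transposed_partial_solution_lie_index]) - sum(transposed_partial_solution_lie)
--         if rest_fill_num < 0:
--             return False
--         if sum(lie_2list[transposed_partial_solution_lie_index]) > sum(
--                 lie_2list[transposed_partial_solution_lie_index]):
--             return False
--         all_possible_rest_lie = get_combinations(list_len=rest_num, num=rest_fill_num)
--         if_possible_match = False
--         for every_possible_rest_lie in all_possible_rest_lie:
--             if if_match(a_list=transposed_partial_solution_lie + every_possible_rest_lie,
--                           match_list=lie_2list[transposed_partial_solution_lie_index]):
--                 if_possible_match = True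
--                 break
--         if not if_possible_match:
--             return False
--     return True
-- ===== SOURCE B (Python) =====
-- def _search(clue, j, r, n, k):
--     # exists a 0/1 suffix of length n with exactly k ones that completes
--     # run-state (j blocks done, current open run r) to match clue exactly?
--     if k < 0 or k > n:
--         return False
--     if n == 0:
--         if r > 0:
--             return j + 1 == len(clue) and r == clue[j]
--         return j == len(clue)
--     # try placing a filled cell
--     if j < len(clue) and r + 1 <= clue[j] and _search(clue, j, r + 1, n - 1, k - 1):
--         return True
--     # try placing an empty cell
--     if r > 0:
--         if r == clue[j]:
--             return _search(clue, j + 1, 0, n - 1, k)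
--         return False
--     return _search(clue, j, 0, n - 1, k)
--
--
-- def pruning_function(partial_solution, depth, lie_2list):
--     rest_num = len(lie_2list) - depth - 1
--     length = rest_num if rest_num > 0 else 0
--     ncols = len(partial_solution[0])
--     for ci in range(ncols):
--         col = [row[ci] for row in partial_solution]
--         clue = lie_2list[ci]
--         k = sum(clue) - sum(col)
--         if k < 0:
--             return False
--         # feed the forced prefix through the run-state machine
--         j, r = 0, 0
--         dead = False
--         for v in col:
--             if v == 1:
--                 if j < len(clue) and r + 1 <= clue[j]:
--                     r += 1
--                 else:
--                     dead = True
--                     break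
--             else:
--                 if r > 0:
--                     if r == clue[j]:
--                         j, r = j + 1, 0
--                     else:
--                         dead = True
--                         break
--         if dead or not _search(clue, j, r, length, k):
--             return False
--     return True
-- ===== Notes on version B (the rewrite author's own statement) =====
-- stated objective: faster
-- what changed: Per column, A enumerates every C(rest_num, rest_fill) candidate suffix via itertools.combinations and re-runs near_list on the full column each time; B feeds the fixed column prefix once through a run-length state machine and then does a pruned recursive cell-by-cell search carrying (blocks done, open run, remaining ones), cutting every branch whose run or count can no longer fit the clue.
-- outside the precondition, e.g. on pruning_function([[2, 0]], 0, [[]]): A returns False, B returns False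
import Mathlib
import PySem

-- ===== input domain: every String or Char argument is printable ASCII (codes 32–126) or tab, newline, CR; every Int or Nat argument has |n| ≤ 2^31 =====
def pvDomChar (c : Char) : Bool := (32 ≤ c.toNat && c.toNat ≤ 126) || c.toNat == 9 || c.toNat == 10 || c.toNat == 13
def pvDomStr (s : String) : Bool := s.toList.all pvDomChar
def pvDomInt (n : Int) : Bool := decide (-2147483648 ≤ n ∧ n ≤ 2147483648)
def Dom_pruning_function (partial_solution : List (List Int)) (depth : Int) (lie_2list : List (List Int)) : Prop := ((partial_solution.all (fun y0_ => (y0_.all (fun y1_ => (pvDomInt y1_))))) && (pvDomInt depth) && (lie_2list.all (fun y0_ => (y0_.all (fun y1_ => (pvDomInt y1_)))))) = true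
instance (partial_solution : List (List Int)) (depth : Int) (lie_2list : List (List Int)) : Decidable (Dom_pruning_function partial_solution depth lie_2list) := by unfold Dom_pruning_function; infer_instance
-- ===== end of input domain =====

-- B replaces A's per-column brute force over all C(rest_num, rest_fill) candidate
-- suffixes (each re-checked with near_list from scratch) by a pruned recursive search
-- over cells that carries the run-length state incrementally; objective: faster.

-- ===== PORT A =====

-- near_list: the two while loops become the obvious mutual structural recursion
-- (outer scan / inner run counter).
mutual
def pvNear : List Int → List Int
  | [] => []
  | a :: t => if a == 1 then pvNearRun t 1 else pvNear t
def pvNearRun : List Int → Int → List Int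
  | [], c => [c]
  | a :: t, c => if a == 1 then pvNearRun t (c + 1) else c :: pvNear t
end

def pvIfMatch (a_list match_list : List Int) : Bool := pvNear a_list == match_list

-- itertools.combinations(xs, k) in the same (lexicographic) order
def pvCombs {α : Type} : List α → Nat → List (List α)
  | _, 0 => [[]]
  | [], _ + 1 => []
  | x :: xs, n + 1 => ((pvCombs xs n).map (fun l => x :: l)) ++ pvCombs xs (n + 1)

-- [0]*list_len then set the chosen positions to 1 ( [0]*negative = [], as Int.toNat clamps )
def pvBuild (list_len : Nat) (positions : List Nat) : List Int :=
  positions.foldl (fun c p => c.set p 1) (List.replicate list_len 0)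

def pvGetCombinations (list_len : Int) (num : Nat) : List (List Int) :=
  (pvCombs (List.range list_len.toNat) num).map (pvBuild list_len.toNat)

-- transpose: row[i] is row.getD i 0, a stand-in exact under Pre_ (every row has ≥ len(matrix[0]) cells)
def pvTranspose (m : List (List Int)) : List (List Int) :=
  (List.range (m.headD []).length).map (fun i => m.map (fun row => row.getD i 0))

def pvALoop (rest_num : Int) (lie : List (List Int)) : List (Int × List Int) → Bool
  | [] => true
  | (i, col) :: t =>
    let clue := PySem.List.pyGetD lie i []
    let rfn := clue.sum - col.sum
    if rfn < 0 then false
    else if clue.sum > clue.sum then false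
    else if (pvGetCombinations rest_num rfn.toNat).any (fun c => pvIfMatch (col ++ c) clue) then
      pvALoop rest_num lie t
    else false

def pruning_function (partial_solution : List (List Int)) (depth : Int) (lie_2list : List (List Int)) : Bool :=
  pvALoop ((lie_2list.length : Int) - depth - 1) lie_2list
    (PySem.List.enumerate (pvTranspose partial_solution) 0)

-- ===== PORT B =====

-- Source B _search: exists a 0/1 suffix of length n with exactly k ones completing state (j, r)?
def pvSearch (clue : List Int) : Nat → Int → Nat → Int → Bool
  | j, r, 0, k =>
    if k < 0 || k > (0 : Int) then false
    else if 0 < r then decide (j + 1 = clue.length) && decide (r = clue.getD j 0)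
    else decide (j = clue.length)
  | j, r, n + 1, k =>
    if k < 0 || k > ((n : Int) + 1) then false
    else
      (decide (j < clue.length) && decide (r + 1 ≤ clue.getD j 0)
        && pvSearch clue j (r + 1) n (k - 1))
      || (if 0 < r then
            (if r == clue.getD j 0 then pvSearch clue (j + 1) 0 n k else false)
          else pvSearch clue j 0 n k)

-- Source B prefix loop: feed the forced column prefix through the run-state machine
def pvPrefix (clue : List Int) : List Int → Nat → Int → Option (Nat × Int)
  | [], j, r => some (j, r)
  | v :: t, j, r =>
    if v == 1 then
      if decide (j < clue.length) && decide (r + 1 ≤ clue.getD j 0) then pvPrefix clue t j (r + 1)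
      else none
    else if 0 < r then
      (if r == clue.getD j 0 then pvPrefix clue t (j + 1) 0 else none)
    else pvPrefix clue t j 0

def pvColCheck (clue col : List Int) (len : Nat) : Bool :=
  let k := clue.sum - col.sum
  if k < 0 then false
  else
    match pvPrefix clue col 0 0 with
    | none => false
    | some (j, r) => pvSearch clue j r len k

def pvBLoop (ps lie : List (List Int)) (len : Nat) : List Nat → Bool
  | [] => true
  | ci :: t =>
    let col := ps.map (fun row => row.getD ci 0)
    let clue := lie.getD ci []
    if pvColCheck clue col len then pvBLoop ps lie len t else false

def pruning_function_alt (partial_solution : List (List Int)) (depth : Int) (lie_2list : List (List Int)) : Bool :=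
  let rest_num := (lie_2list.length : Int) - depth - 1
  let len : Nat := if 0 < rest_num then rest_num.toNat else 0
  pvBLoop partial_solution lie_2list len (List.range (partial_solution.headD []).length)

-- ===== PRECONDITION & SPEC =====
-- Pre_ excludes exactly the shapes on which A's eager transpose / clue indexing can raise
-- an IndexError: an empty grid, a row shorter than the first row, or fewer clue lists than
-- columns; on part of those A still returns False early (an earlier column already fails),
-- and B returns False there too.
def Pre_pruning_function (partial_solution : List (List Int)) (_depth : Int) (lie_2list : List (List Int)) : Prop :=
  partial_solution ≠ [] ∧
  (∀ row ∈ partial_solution, (partial_solution.headD []).length ≤ row.length) ∧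
  (partial_solution.headD []).length ≤ lie_2list.length
instance (partial_solution : List (List Int)) (depth : Int) (lie_2list : List (List Int)) : Decidable (Pre_pruning_function partial_solution depth lie_2list) := by unfold Pre_pruning_function; infer_instance

def pvWitness_pruning_function : List (List Int) × Int × List (List Int) := ([[0]], 0, [[]])

def Spec_pruning_function (partial_solution : List (List Int)) (depth : Int) (lie_2list : List (List Int)) (out : Bool) : Prop := out = pruning_function_alt partial_solution depth lie_2list
instance (partial_solution : List (List Int)) (depth : Int) (lie_2list : List (List Int)) (out : Bool) : Decidable (Spec_pruning_function partial_solution depth lie_2list out) := by unfold Spec_pruning_function; infer_instance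

-- ===== CLAIM (what is proved, stated in full; the proofs are below) =====
def Claim_equal_pruning_function : Prop := ∀ (partial_solution : List (List Int)) (depth : Int) (lie_2list : List (List Int)), Dom_pruning_function partial_solution depth lie_2list → Pre_pruning_function partial_solution depth lie_2list → Spec_pruning_function partial_solution depth lie_2list (pruning_function partial_solution depth lie_2list)

-- ===== LEMMAS AND PROOFS =====

-- the run-state machine's acceptance condition
def pvFinal (clue : List Int) (j : Nat) (r : Int) : Bool :=
  if 0 < r then decide (j + 1 = clue.length) && decide (r = clue.getD j 0)
  else decide (j = clue.length)

def pvAccept (clue xs : List Int) (j : Nat) (r : Int) : Bool :=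
  match pvPrefix clue xs j r with
  | none => false
  | some (j', r') => pvFinal clue j' r'

theorem pvAccept_cons_one (clue t : List Int) (j : Nat) (r : Int) :
    pvAccept clue ((1 : Int) :: t) j r =
      (if decide (j < clue.length) && decide (r + 1 ≤ clue.getD j 0) then
        pvAccept clue t j (r + 1) else false) := by
  unfold pvAccept
  show (match pvPrefix clue ((1 : Int) :: t) j r with
    | none => false | some (j', r') => pvFinal clue j' r') = _
  rw [show pvPrefix clue ((1 : Int) :: t) j r =
      (if decide (j < clue.length) && decide (r + 1 ≤ clue.getD j 0) then
        pvPrefix clue t j (r + 1) else none) from by simp [pvPrefix]]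
  split_ifs <;> rfl

theorem pvAccept_cons_zero (clue t : List Int) (v : Int) (j : Nat) (r : Int)
    (hv : (v == 1) = false) :
    pvAccept clue (v :: t) j r =
      (if 0 < r then
        (if r == clue.getD j 0 then pvAccept clue t (j + 1) 0 else false)
      else pvAccept clue t j 0) := by
  unfold pvAccept
  show (match pvPrefix clue (v :: t) j r with
    | none => false | some (j', r') => pvFinal clue j' r') = _
  rw [show pvPrefix clue (v :: t) j r =
      (if 0 < r then
        (if r == clue.getD j 0 then pvPrefix clue t (j + 1) 0 else none)
      else pvPrefix clue t j 0) from by simp [pvPrefix, hv]]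
  split_ifs <;> rfl

theorem mem_pvCombs {α : Type} (xs : List α) (k : Nat) (ps : List α) :
    ps ∈ pvCombs xs k ↔ ps.Sublist xs ∧ ps.length = k := by
  induction xs generalizing k ps with
  | nil =>
    cases k with
    | zero =>
      simp only [pvCombs, List.mem_singleton]
      constructor
      · rintro rfl; exact ⟨List.Sublist.refl _, rfl⟩
      · rintro ⟨hs, hl⟩; exact List.eq_nil_of_length_eq_zero hl
    | succ k =>
      simp only [pvCombs, List.not_mem_nil, false_iff, not_and]
      intro hs
      have h := hs.length_le
      simp only [List.length_nil, Nat.le_zero] at h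
      omega
  | cons x xs ih =>
    cases k with
    | zero =>
      simp only [pvCombs, List.mem_singleton]
      constructor
      · rintro rfl; exact ⟨List.nil_sublist _, rfl⟩
      · rintro ⟨hs, hl⟩; exact List.eq_nil_of_length_eq_zero hl
    | succ k =>
      simp only [pvCombs, List.mem_append, List.mem_map, ih, List.sublist_cons_iff]
      constructor
      · rintro (⟨q, ⟨hq, hl⟩, rfl⟩ | ⟨hs, hl⟩)
        · exact ⟨Or.inr ⟨q, rfl, hq⟩, by simp [hl]⟩
        · exact ⟨Or.inl hs, hl⟩
      · rintro ⟨hs | ⟨q, rfl, hq⟩, hl⟩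
        · exact Or.inr ⟨hs, hl⟩
        · exact Or.inl ⟨q, ⟨hq, by simpa using hl⟩, rfl⟩

theorem foldl_set_length (ps : List Nat) (acc : List Int) :
    (ps.foldl (fun c p => c.set p 1) acc).length = acc.length := by
  induction ps generalizing acc with
  | nil => rfl
  | cons p ps ih => simp [List.foldl_cons, ih]

theorem foldl_set_getElem? (ps : List Nat) (acc : List Int) (i : Nat) :
    (ps.foldl (fun c p => c.set p 1) acc)[i]? =
      if i ∈ ps ∧ i < acc.length then some 1 else acc[i]? := by
  induction ps generalizing acc with
  | nil => simp
  | cons p ps ih =>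
    simp only [List.foldl_cons, ih, List.length_set, List.mem_cons]
    by_cases hip : i = p
    · subst hip
      by_cases hil : i < acc.length
      · simp [hil]
      · have h1 : acc[i]? = none := List.getElem?_eq_none (by omega)
        have h2 : (acc.set i 1)[i]? = none := by
          apply List.getElem?_eq_none; simp; omega
        simp [hil]
    · rw [List.getElem?_set_ne (fun h => hip h.symm)]
      by_cases him : i ∈ ps <;> simp [him, hip]

theorem count_one_eq_filter_range (s : List Int) :
    s.count 1 = ((List.range s.length).filter (fun i => s.getD i 0 == 1)).length := by
  induction s with
  | nil => simp
  | cons v t ih =>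
    rw [List.length_cons, List.range_succ_eq_map, List.filter_cons, List.filter_map]
    have hcomp : ((fun i => (v :: t).getD i 0 == 1) ∘ Nat.succ) = (fun i => t.getD i 0 == 1) := by
      funext i; simp [List.getD]
    rw [hcomp]
    by_cases hv : v = 1 <;>
      simp [hv, ih, List.getD, Nat.add_comm]

theorem filter_mem_of_sublist (l ps : List Nat) (hs : ps.Sublist l) (hn : l.Nodup) :
    l.filter (fun i => decide (i ∈ ps)) = ps := by
  induction hs with
  | slnil => rfl
  | cons a hs ih =>
    rename_i l₁ l₂
    have hnd := (List.nodup_cons.mp hn).2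
    have hna : a ∉ l₁ := fun h => (List.nodup_cons.mp hn).1 (hs.subset h)
    simp only [List.filter_cons, decide_eq_true_eq]
    rw [if_neg (by simpa using hna)]
    exact ih hnd
  | cons₂ a hs ih =>
    rename_i l₁ l₂
    have hnd := (List.nodup_cons.mp hn).2
    have hal : a ∉ l₂ := (List.nodup_cons.mp hn).1
    simp only [List.filter_cons, decide_eq_true_eq]
    rw [if_pos (List.mem_cons_self)]
    congr 1
    have : ∀ x ∈ l₂, (decide (x ∈ a :: l₁)) = (decide (x ∈ l₁)) := by
      intro x hx
      have hxa : x ≠ a := fun h => hal (h ▸ hx)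
      simp [List.mem_cons, hxa]
    rw [List.filter_congr this]
    exact ih hnd

-- characterisation of A's generated candidate lists
theorem mem_getCombinations (L k : Nat) (s : List Int) :
    s ∈ (pvCombs (List.range L) k).map (pvBuild L) ↔
      s.length = L ∧ (∀ x ∈ s, x = 0 ∨ x = 1) ∧ s.count 1 = k := by
  constructor
  · rintro hmem
    obtain ⟨ps, hps, rfl⟩ := List.mem_map.mp hmem
    obtain ⟨hsub, hlen⟩ := (mem_pvCombs _ _ _).mp hps
    have hndR : (List.range L).Nodup := List.nodup_range
    have hnd : ps.Nodup := hsub.nodup hndR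
    have hmemlt : ∀ p ∈ ps, p < L := fun p hp => List.mem_range.mp (hsub.subset hp)
    have hL : (pvBuild L ps).length = L := by
      unfold pvBuild; rw [foldl_set_length]; simp
    have hget : ∀ i : Nat, (pvBuild L ps)[i]? =
        if i ∈ ps ∧ i < L then some 1 else (List.replicate L (0:Int))[i]? := by
      intro i; unfold pvBuild; rw [foldl_set_getElem?]; simp
    refine ⟨hL, ?_, ?_⟩
    · intro x hx
      obtain ⟨i, hi, hxi⟩ := List.getElem_of_mem hx
      have : (pvBuild L ps)[i]? = some x := by rw [List.getElem?_eq_getElem hi, hxi]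
      rw [hget i] at this
      split_ifs at this with h
      · right; simpa using this.symm
      · left
        rw [List.getElem?_replicate] at this
        rw [hL] at hi
        rw [if_pos hi] at this
        exact (Option.some_inj.mp this).symm
    · -- count of ones = |ps|
      rw [count_one_eq_filter_range, hL]
      have : ∀ i ∈ List.range L, ((pvBuild L ps).getD i 0 == 1) = decide (i ∈ ps) := by
        intro i hiR
        have hiL : i < L := List.mem_range.mp hiR
        have := hget i
        rw [List.getD_eq_getElem?_getD, this]
        by_cases hip : i ∈ ps
        · simp [hip, hiL]
        · simp [hip, hiL]
      rw [List.filter_congr this, filter_mem_of_sublist _ _ hsub hndR, hlen]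
  · rintro ⟨hlen, hbin, hcount⟩
    set ps := (List.range L).filter (fun i => s.getD i 0 == 1) with hps
    have hsub : ps.Sublist (List.range L) := List.filter_sublist
    have hpl : ps.length = k := by
      rw [hps]
      rw [count_one_eq_filter_range, hlen] at hcount
      omega
    refine List.mem_map.mpr ⟨ps, (mem_pvCombs _ _ _).mpr ⟨hsub, hpl⟩, ?_⟩
    have hL : (pvBuild L ps).length = L := by
      unfold pvBuild; rw [foldl_set_length]; simp
    apply List.ext_getElem?
    intro i
    unfold pvBuild
    rw [foldl_set_getElem?]
    simp only [List.length_replicate]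
    by_cases hiL : i < L
    · have hmem_iff : i ∈ ps ↔ s.getD i 0 = 1 := by
        rw [hps]; simp [List.mem_filter, List.mem_range, hiL]
      have hiS : i < s.length := by omega
      rw [List.getD_eq_getElem?_getD, List.getElem?_eq_getElem hiS] at hmem_iff
      simp only [Option.getD_some] at hmem_iff
      by_cases hv : s[i] = 1
      · rw [if_pos ⟨hmem_iff.mpr hv, hiL⟩, List.getElem?_eq_getElem hiS, hv]
      · have h0 : s[i] = 0 := by
          rcases hbin s[i] (List.getElem_mem hiS) with h | h
          · exact h
          · exact absurd h hv
        rw [if_neg (fun hc => hv (hmem_iff.mp hc.1)), List.getElem?_replicate,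
          if_pos hiL, List.getElem?_eq_getElem hiS, h0]
    · rw [if_neg (fun hc => hiL hc.2), List.getElem?_replicate, if_neg hiL,
        List.getElem?_eq_none (by omega)]

theorem pvPrefix_append (clue a b : List Int) (j : Nat) (r : Int) :
    pvPrefix clue (a ++ b) j r =
      (pvPrefix clue a j r).bind (fun s => pvPrefix clue b s.1 s.2) := by
  induction a generalizing j r with
  | nil => rfl
  | cons v t ih =>
    simp only [List.cons_append, pvPrefix]
    split_ifs <;> simp [ih]

theorem pvNearRun_head (t : List Int) (c : Int) :
    ∃ c' l, pvNearRun t c = c' :: l ∧ c ≤ c' := by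
  induction t generalizing c with
  | nil => exact ⟨c, [], rfl, le_rfl⟩
  | cons v t ih =>
    by_cases hv : v = 1
    · obtain ⟨c', l, he, hle⟩ := ih (c + 1)
      exact ⟨c', l, by simp [pvNearRun, hv, he], by omega⟩
    · exact ⟨c, pvNear t, by simp [pvNearRun, hv], le_rfl⟩

theorem drop_eq_singleton (l : List Int) (j : Nat) (x : Int) (hj : j ≤ l.length) :
    l.drop j = [x] ↔ j + 1 = l.length ∧ l.getD j 0 = x := by
  constructor
  · intro h
    have hl : l.length - j = 1 := by
      have := congrArg List.length h
      simpa using this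
    have hj : j < l.length := by omega
    refine ⟨by omega, ?_⟩
    have h0 : (l.drop j)[0]? = some x := by rw [h]; rfl
    rw [List.getElem?_drop] at h0
    rw [List.getD_eq_getElem?_getD]
    simp only [Nat.add_zero] at h0
    rw [h0]
    rfl
  · rintro ⟨hl, hx⟩
    have hj : j < l.length := by omega
    rw [List.drop_eq_getElem_cons hj]
    have hd : List.drop (j + 1) l = [] := List.drop_eq_nil_iff.mpr (by omega)
    rw [hd]
    congr 1
    rw [List.getD_eq_getElem?_getD, List.getElem?_eq_getElem hj] at hx
    simpa using hx

-- the machine recognises exactly the clue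
theorem pvAccept_iff (clue : List Int) :
    ∀ (xs : List Int) (j : Nat) (r : Int), j ≤ clue.length → 0 ≤ r →
      (pvAccept clue xs j r = true ↔
        clue.drop j = (if 0 < r then pvNearRun xs r else pvNear xs)) := by
  intro xs
  induction xs with
  | nil =>
    intro j r hj hr
    unfold pvAccept pvPrefix pvFinal
    by_cases hrpos : 0 < r
    · simp only [if_pos hrpos]
      rw [show pvNearRun [] r = [r] from rfl]
      rw [drop_eq_singleton clue j r hj]
      simp only [Bool.and_eq_true, decide_eq_true_eq]
      constructor
      · rintro ⟨h1, h2⟩; exact ⟨h1, h2.symm⟩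
      · rintro ⟨h1, h2⟩; exact ⟨h1, h2.symm⟩
    · have hr0 : r = 0 := by omega
      simp only [if_neg hrpos]
      rw [show pvNear [] = [] from rfl]
      rw [List.drop_eq_nil_iff]
      simp only [decide_eq_true_eq]
      omega
  | cons v t ih =>
    intro j r hj hr
    by_cases hv : v = 1
    · subst hv
      have hstep : pvAccept clue ((1:Int) :: t) j r =
          (if decide (j < clue.length) && decide (r + 1 ≤ clue.getD j 0) then
            pvAccept clue t j (r + 1) else false) := by
        unfold pvAccept
        show (match pvPrefix clue ((1:Int) :: t) j r with
          | none => false | some (j', r') => pvFinal clue j' r') = _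
        rw [show pvPrefix clue ((1:Int) :: t) j r =
            (if decide (j < clue.length) && decide (r + 1 ≤ clue.getD j 0) then
              pvPrefix clue t j (r + 1) else none) from by simp [pvPrefix]]
        split_ifs <;> rfl
      have hRHS : (if 0 < r then pvNearRun ((1:Int) :: t) r else pvNear ((1:Int) :: t))
          = pvNearRun t (r + 1) := by
        by_cases hrpos : 0 < r
        · simp [hrpos, pvNearRun]
        · have hr0 : r = 0 := by omega
          simp [pvNear, hr0]
      rw [hstep, hRHS]
      by_cases hg : j < clue.length ∧ r + 1 ≤ clue.getD j 0
      · rw [if_pos (by simp only [Bool.and_eq_true, decide_eq_true_eq]; exact hg)]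
        have := ih j (r + 1) hj (by omega)
        rw [this, if_pos (by omega)]
      · rw [if_neg (by
          intro hc
          simp only [Bool.and_eq_true, decide_eq_true_eq] at hc
          exact hg ⟨hc.1, hc.2⟩)]
        simp only [Bool.false_eq_true, false_iff]
        intro hEq
        obtain ⟨c', l, he, hle⟩ := pvNearRun_head t (r + 1)
        rw [he] at hEq
        by_cases hjlen : j < clue.length
        · have hne : r + 1 ≤ clue.getD j 0 → False := fun h => hg ⟨hjlen, h⟩
          rw [List.drop_eq_getElem_cons hjlen] at hEq
          have h1 : clue[j] = c' := (List.cons_eq_cons.mp hEq).1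
          have h2 : clue.getD j 0 = clue[j] := by
            rw [List.getD_eq_getElem?_getD, List.getElem?_eq_getElem hjlen]; rfl
          exact hne (by omega)
        · have : clue.drop j = [] := List.drop_eq_nil_iff.mpr (by omega)
          rw [this] at hEq
          exact List.cons_ne_nil _ _ hEq.symm
    · -- v ≠ 1 : an empty cell
      have hstep : pvAccept clue (v :: t) j r =
          (if 0 < r then
            (if r == clue.getD j 0 then pvAccept clue t (j + 1) 0 else false)
          else pvAccept clue t j 0) := by
        unfold pvAccept
        show (match pvPrefix clue (v :: t) j r with
          | none => false | some (j', r') => pvFinal clue j' r') = _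
        rw [show pvPrefix clue (v :: t) j r =
            (if 0 < r then
              (if r == clue.getD j 0 then pvPrefix clue t (j + 1) 0 else none)
            else pvPrefix clue t j 0) from by simp [pvPrefix, hv]]
        split_ifs <;> rfl
      rw [hstep]
      by_cases hrpos : 0 < r
      · have hRHS : (if 0 < r then pvNearRun (v :: t) r else pvNear (v :: t))
            = r :: pvNear t := by simp [hrpos, pvNearRun, hv]
        rw [hRHS, if_pos hrpos]
        by_cases hguard : r = clue.getD j 0
        · have hjlen : j < clue.length := by
            by_contra hc
            have : clue.getD j 0 = 0 := by
              rw [List.getD_eq_getElem?_getD, List.getElem?_eq_none (by omega)]; rfl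
            omega
          rw [if_pos (by simpa using hguard)]
          have := ih (j + 1) 0 (by omega) le_rfl
          rw [this, if_neg (by omega)]
          rw [List.drop_eq_getElem_cons hjlen]
          have h2 : clue.getD j 0 = clue[j] := by
            rw [List.getD_eq_getElem?_getD, List.getElem?_eq_getElem hjlen]; rfl
          have hcj : clue[j] = r := by omega
          constructor
          · intro hrest
            rw [hcj, hrest]
          · intro hEq
            exact (List.cons_eq_cons.mp hEq).2
        · rw [if_neg (by simpa using hguard)]
          simp only [Bool.false_eq_true, false_iff]
          intro hEq
          by_cases hjlen : j < clue.length
          · rw [List.drop_eq_getElem_cons hjlen] at hEq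
            have h1 : clue[j] = r := (List.cons_eq_cons.mp hEq).1
            have h2 : clue.getD j 0 = clue[j] := by
              rw [List.getD_eq_getElem?_getD, List.getElem?_eq_getElem hjlen]; rfl
            exact hguard (by omega)
          · have : clue.drop j = [] := List.drop_eq_nil_iff.mpr (by omega)
            rw [this] at hEq
            exact List.cons_ne_nil _ _ hEq.symm
      · have hr0 : r = 0 := by omega
        have hRHS : (if 0 < r then pvNearRun (v :: t) r else pvNear (v :: t))
            = pvNear t := by simp [hrpos, pvNear, hv]
        rw [hRHS, if_neg hrpos]
        have := ih j 0 hj le_rfl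
        rw [this, if_neg (by omega)]

theorem pvPrefix_bounds (clue : List Int) :
    ∀ (xs : List Int) (j : Nat) (r : Int) (j' : Nat) (r' : Int),
      pvPrefix clue xs j r = some (j', r') → j ≤ clue.length → 0 ≤ r →
      j' ≤ clue.length ∧ 0 ≤ r' := by
  intro xs
  induction xs with
  | nil =>
    intro j r j' r' h hj hr
    unfold pvPrefix at h
    cases h
    exact ⟨hj, hr⟩
  | cons v t ih =>
    intro j r j' r' h hj hr
    unfold pvPrefix at h
    by_cases hv : v == 1
    · rw [if_pos hv] at h
      by_cases hg : decide (j < clue.length) && decide (r + 1 ≤ clue.getD j 0)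
      · rw [if_pos hg] at h
        exact ih j (r + 1) j' r' h hj (by omega)
      · rw [if_neg hg] at h
        cases h
    · rw [if_neg hv] at h
      by_cases hrpos : 0 < r
      · rw [if_pos hrpos] at h
        by_cases hg : r == clue.getD j 0
        · rw [if_pos hg] at h
          have hjlen : j < clue.length := by
            by_contra hc
            have h0 : clue.getD j 0 = 0 := by
              rw [List.getD_eq_getElem?_getD, List.getElem?_eq_none (by omega)]; rfl
            have := eq_of_beq hg
            omega
          exact ih (j + 1) 0 j' r' h (by omega) le_rfl
        · rw [if_neg hg] at h
          cases h
      · rw [if_neg hrpos] at h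
        exact ih j 0 j' r' h hj le_rfl

-- the pruned search finds exactly the completable suffixes with k ones
theorem pvSearch_iff (clue : List Int) :
    ∀ (n : Nat) (j : Nat) (r : Int) (k : Int), j ≤ clue.length → 0 ≤ r →
      (pvSearch clue j r n k = true ↔
        ∃ s : List Int, s.length = n ∧ (∀ x ∈ s, x = 0 ∨ x = 1) ∧
          (s.count 1 : Int) = k ∧ pvAccept clue s j r = true) := by
  intro n
  induction n with
  | zero =>
    intro j r k hj hr
    by_cases hk : k = 0
    · subst hk
      show (if (0:Int) < 0 || (0:Int) > (0:Int) then false else _) = true ↔ _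
      rw [if_neg (by simp)]
      constructor
      · intro h
        exact ⟨[], rfl, by simp, by simp, by simpa [pvAccept, pvPrefix, pvFinal] using h⟩
      · rintro ⟨s, hlen, -, -, hacc⟩
        rw [List.length_eq_zero_iff] at hlen
        subst hlen
        simpa [pvAccept, pvPrefix, pvFinal] using hacc
    · show (if k < 0 || k > (0:Int) then false else _) = true ↔ _
      rw [if_pos (by simp only [Bool.or_eq_true, decide_eq_true_eq]; omega)]
      simp only [Bool.false_eq_true, false_iff]
      rintro ⟨s, hlen, -, hcount, -⟩
      rw [List.length_eq_zero_iff] at hlen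
      subst hlen
      simp at hcount
      exact hk hcount.symm
  | succ n ihn =>
    intro j r k hj hr
    by_cases hk : k < 0 ∨ (n : Int) + 1 < k
    · show (if k < 0 || k > ((n:Int) + 1) then false else _) = true ↔ _
      rw [if_pos (by simp only [Bool.or_eq_true, decide_eq_true_eq]; omega)]
      simp only [Bool.false_eq_true, false_iff]
      rintro ⟨s, hlen, -, hcount, -⟩
      have h1 : s.count 1 ≤ s.length := List.count_le_length
      rw [hlen] at h1
      omega
    · push Not at hk
      show (if k < 0 || k > ((n:Int) + 1) then false
            else (decide (j < clue.length) && decide (r + 1 ≤ clue.getD j 0)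
                   && pvSearch clue j (r + 1) n (k - 1))
              || (if 0 < r then
                    (if r == clue.getD j 0 then pvSearch clue (j + 1) 0 n k else false)
                  else pvSearch clue j 0 n k)) = true ↔ _
      rw [if_neg (by simp only [Bool.or_eq_true, decide_eq_true_eq]; omega)]
      constructor
      · intro h
        rcases Bool.or_eq_true _ _ |>.mp h with h | h
        · -- a filled cell was placed
          rw [Bool.and_eq_true, Bool.and_eq_true] at h
          obtain ⟨⟨hg1, hg2⟩, hrec⟩ := h
          rw [decide_eq_true_eq] at hg1 hg2
          obtain ⟨s, hlen, hbin, hcount, hacc⟩ :=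
            (ihn j (r + 1) (k - 1) hj (by omega)).mp hrec
          refine ⟨1 :: s, by simp [hlen], ?_, ?_, ?_⟩
          · intro x hx
            rcases List.mem_cons.mp hx with rfl | hx
            · exact Or.inr rfl
            · exact hbin x hx
          · rw [List.count_cons]
            simp only [BEq.rfl, if_pos]
            push_cast
            omega
          · rw [pvAccept_cons_one,
              if_pos (by simp only [Bool.and_eq_true, decide_eq_true_eq]; exact ⟨hg1, hg2⟩)]
            exact hacc
        · by_cases hrpos : 0 < r
          · rw [if_pos hrpos] at h
            by_cases hg : r == clue.getD j 0
            · rw [if_pos hg] at h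
              have hgv := eq_of_beq hg
              have hjlen : j < clue.length := by
                by_contra hc
                have h0 : clue.getD j 0 = 0 := by
                  rw [List.getD_eq_getElem?_getD, List.getElem?_eq_none (by omega)]; rfl
                omega
              obtain ⟨s, hlen, hbin, hcount, hacc⟩ :=
                (ihn (j + 1) 0 k (by omega) le_rfl).mp h
              refine ⟨0 :: s, by simp [hlen], ?_, ?_, ?_⟩
              · intro x hx
                rcases List.mem_cons.mp hx with rfl | hx
                · exact Or.inl rfl
                · exact hbin x hx
              · rw [List.count_cons]
                simp only [show (((0:Int) == 1) = false) from rfl, Bool.false_eq_true, if_false]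
                simpa using hcount
              · rw [pvAccept_cons_zero clue s 0 j r (by decide), if_pos hrpos, if_pos hg]
                exact hacc
            · rw [if_neg hg] at h
              cases h
          · rw [if_neg hrpos] at h
            have hr0 : r = 0 := by omega
            obtain ⟨s, hlen, hbin, hcount, hacc⟩ := (ihn j 0 k hj le_rfl).mp h
            refine ⟨0 :: s, by simp [hlen], ?_, ?_, ?_⟩
            · intro x hx
              rcases List.mem_cons.mp hx with rfl | hx
              · exact Or.inl rfl
              · exact hbin x hx
            · rw [List.count_cons]
              simp only [show (((0:Int) == 1) = false) from rfl, Bool.false_eq_true, if_false]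
              simpa using hcount
            · rw [pvAccept_cons_zero clue s 0 j r (by decide), if_neg hrpos]
              exact hacc
      · rintro ⟨s, hlen, hbin, hcount, hacc⟩
        cases s with
        | nil => simp at hlen
        | cons v t =>
          have hlent : t.length = n := by simpa using hlen
          have hbint : ∀ x ∈ t, x = 0 ∨ x = 1 := fun x hx => hbin x (List.mem_cons_of_mem v hx)
          rcases hbin v List.mem_cons_self with rfl | rfl
          · -- v = 0
            rw [pvAccept_cons_zero clue t 0 j r (by decide)] at hacc
            have hcnt : (t.count 1 : Int) = k := by
              rw [List.count_cons] at hcount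
              simpa using hcount
            by_cases hrpos : 0 < r
            · rw [if_pos hrpos] at hacc
              by_cases hg : r == clue.getD j 0
              · rw [if_pos hg] at hacc
                have hgv := eq_of_beq hg
                have hjlen : j < clue.length := by
                  by_contra hc
                  have h0 : clue.getD j 0 = 0 := by
                    rw [List.getD_eq_getElem?_getD, List.getElem?_eq_none (by omega)]; rfl
                  omega
                have := (ihn (j + 1) 0 k (by omega) le_rfl).mpr ⟨t, hlent, hbint, hcnt, hacc⟩
                apply Bool.or_eq_true _ _ |>.mpr
                right
                rw [if_pos hrpos, if_pos hg]
                exact this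
              · rw [if_neg hg] at hacc
                cases hacc
            · rw [if_neg hrpos] at hacc
              have := (ihn j 0 k hj le_rfl).mpr ⟨t, hlent, hbint, hcnt, hacc⟩
              apply Bool.or_eq_true _ _ |>.mpr
              right
              rw [if_neg hrpos]
              exact this
          · -- v = 1
            rw [pvAccept_cons_one] at hacc
            by_cases hg : decide (j < clue.length) && decide (r + 1 ≤ clue.getD j 0)
            · rw [if_pos hg] at hacc
              have hcnt : (t.count 1 : Int) = k - 1 := by
                rw [List.count_cons] at hcount
                simp only [BEq.rfl, if_pos] at hcount
                push_cast at hcount ⊢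
                omega
              have := (ihn j (r + 1) (k - 1) hj (by omega)).mpr ⟨t, hlent, hbint, hcnt, hacc⟩
              apply Bool.or_eq_true _ _ |>.mpr
              left
              rw [Bool.and_eq_true]
              exact ⟨hg, this⟩
            · rw [if_neg hg] at hacc
              cases hacc

-- per-column equivalence
theorem col_equiv (col clue : List Int) (rest_num : Int) :
    (let rfn := clue.sum - col.sum
     if rfn < 0 then false
     else if clue.sum > clue.sum then false
     else (pvGetCombinations rest_num rfn.toNat).any (fun c => pvIfMatch (col ++ c) clue))
    = pvColCheck clue col (if 0 < rest_num then rest_num.toNat else 0) := by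
  have hLen : (if 0 < rest_num then rest_num.toNat else 0) = rest_num.toNat := by
    split_ifs with h
    · rfl
    · rw [Int.toNat_of_nonpos (by omega)]
  rw [hLen]
  simp only []
  by_cases h1 : clue.sum - col.sum < 0
  · rw [if_pos h1]
    unfold pvColCheck
    rw [if_pos h1]
  · rw [if_neg h1, if_neg (lt_irrefl _)]
    unfold pvColCheck
    rw [if_neg h1]
    cases hpre : pvPrefix clue col 0 0 with
    | none =>
      rw [Bool.eq_iff_iff]
      simp only [Bool.false_eq_true, iff_false, List.any_eq_true, not_exists, not_and]
      intro c hc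
      unfold pvIfMatch
      intro hbeq
      have hmatch : pvNear (col ++ c) = clue := by simpa using hbeq
      have hacc : pvAccept clue (col ++ c) 0 0 = true := by
        rw [pvAccept_iff clue (col ++ c) 0 0 (by omega) le_rfl]
        simpa using hmatch.symm
      unfold pvAccept at hacc
      rw [pvPrefix_append, hpre] at hacc
      simp at hacc
    | some s =>
      obtain ⟨j, r⟩ := s
      obtain ⟨hj, hr⟩ := pvPrefix_bounds clue col 0 0 j r hpre (by omega) le_rfl
      rw [Bool.eq_iff_iff, List.any_eq_true,
        pvSearch_iff clue rest_num.toNat j r (clue.sum - col.sum) hj hr]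
      constructor
      · rintro ⟨c, hc, hmatchb⟩
        unfold pvIfMatch at hmatchb
        have hmatch : pvNear (col ++ c) = clue := by simpa using hmatchb
        unfold pvGetCombinations at hc
        obtain ⟨hlen, hbin, hcount⟩ := (mem_getCombinations _ _ _).mp hc
        have hacc0 : pvAccept clue (col ++ c) 0 0 = true := by
          rw [pvAccept_iff clue (col ++ c) 0 0 (by omega) le_rfl]
          simpa using hmatch.symm
        have hacc : pvAccept clue c j r = true := by
          unfold pvAccept at hacc0 ⊢
          rw [pvPrefix_append, hpre] at hacc0
          exact hacc0
        exact ⟨c, hlen, hbin, by rw [hcount]; omega, hacc⟩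
      · rintro ⟨c, hlen, hbin, hcount, hacc⟩
        refine ⟨c, ?_, ?_⟩
        · unfold pvGetCombinations
          apply (mem_getCombinations _ _ _).mpr
          refine ⟨hlen, hbin, ?_⟩
          omega
        · unfold pvIfMatch
          have hacc0 : pvAccept clue (col ++ c) 0 0 = true := by
            unfold pvAccept at hacc ⊢
            rw [pvPrefix_append, hpre]
            exact hacc
          rw [pvAccept_iff clue (col ++ c) 0 0 (by omega) le_rfl] at hacc0
          simp only [lt_irrefl, if_false, List.drop_zero] at hacc0
          simpa using hacc0.symm

theorem enumerate_transpose (ps : List (List Int)) :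
    PySem.List.enumerate (pvTranspose ps) 0 =
      (List.range (ps.headD []).length).map
        (fun (i : Nat) => ((i : Int), ps.map (fun row => row.getD i 0))) := by
  apply List.ext_getElem?
  intro k
  rw [PySem.List.getElem?_enumerate]
  unfold pvTranspose
  rw [List.getElem?_map, List.getElem?_map]
  by_cases hk : k < (ps.headD []).length
  · rw [List.getElem?_range hk]
    simp
  · rw [List.getElem?_eq_none (by simpa using hk)]
    rfl

theorem loop_bridge (ps lie : List (List Int)) (rest_num : Int) (len : Nat)
    (hlen : len = if 0 < rest_num then rest_num.toNat else 0) :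
    ∀ is : List Nat,
      pvALoop rest_num lie (is.map (fun (i : Nat) => ((i : Int), ps.map (fun row => row.getD i 0))))
        = pvBLoop ps lie len is := by
  intro is
  induction is with
  | nil => rfl
  | cons i is ih =>
    simp only [List.map_cons]
    rw [show pvALoop rest_num lie ((((i : Nat) : Int), ps.map (fun row => row.getD i 0)) :: (is.map (fun (i : Nat) => ((i : Int), ps.map (fun row => row.getD i 0))))) = (let clue := PySem.List.pyGetD lie ((i : Nat) : Int) []; let col := ps.map (fun row => row.getD i 0); let rfn := clue.sum - col.sum; if rfn < 0 then false else if clue.sum > clue.sum then false else if (pvGetCombinations rest_num rfn.toNat).any (fun c => pvIfMatch (col ++ c) clue) then pvALoop rest_num lie (is.map (fun (i : Nat) => ((i : Int), ps.map (fun row => row.getD i 0)))) else false) from rfl]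
    simp only [PySem.List.pyGetD_natCast]
    have hcol := col_equiv (ps.map (fun row => row.getD i 0)) (lie.getD i []) rest_num
    rw [← hlen] at hcol
    show (if (lie.getD i []).sum - (ps.map (fun row => row.getD i 0)).sum < 0 then false
          else if (lie.getD i []).sum > (lie.getD i []).sum then false
          else if (pvGetCombinations rest_num ((lie.getD i []).sum - (ps.map (fun row => row.getD i 0)).sum).toNat).any
              (fun c => pvIfMatch ((ps.map (fun row => row.getD i 0)) ++ c) (lie.getD i [])) then
            pvALoop rest_num lie (is.map (fun (i : Nat) => ((i : Int), ps.map (fun row => row.getD i 0))))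
          else false)
        = pvBLoop ps lie len (i :: is)
    rw [show pvBLoop ps lie len (i :: is) = (if pvColCheck (lie.getD i []) (ps.map (fun row => row.getD i 0)) len then pvBLoop ps lie len is else false) from rfl]
    rw [← hcol, ← ih]
    by_cases h1 : (lie.getD i []).sum - (ps.map (fun row => row.getD i 0)).sum < 0
    · rw [if_pos h1]
      rw [if_pos h1]
      simp
    · rw [if_neg h1, if_neg (lt_irrefl _), if_neg h1, if_neg (lt_irrefl _)]

-- ===== VERDICT (by name: the statement is the Claim_ definition above) =====
theorem pruning_function_spec : Claim_equal_pruning_function := by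
  intro ps depth lie _hdom _hpre
  unfold Spec_pruning_function pruning_function pruning_function_alt
  rw [enumerate_transpose]
  exact loop_bridge ps lie _ _ rfl (List.range (ps.headD []).length)
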